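-- pv_equiv track=rewrite | github.com/fauq/github-username-checker | github_username_checker.py | is_valid_github_username
-- ===== SOURCE A (Python) =====
-- RESERVED_KEYWORDS = {
--     'about', 'abuse', 'account', 'admin', 'api', 'apps', 'archive',
--     'blog', 'business', 'collections', 'contact', 'dashboard', 'desktop',
--     'dev', 'docs', 'enterprise', 'events', 'explore', 'features',
--     'followers', 'following', 'gist', 'gists', 'help', 'home',
--     'issues', 'jobs', 'login', 'logout', 'marketplace', 'new',
--     'news', 'notifications', 'orgs', 'organizations', 'pricing',
--     'private', 'public', 'pulls', 'repositories', 'search', 'security',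
--     'settings', 'shop', 'site', 'sponsors', 'status', 'support',
--     'team', 'teams', 'topics', 'tos', 'trending', 'www', 'abuse', 'security'
-- }
--
-- def is_valid_github_username(username):
--     if not username or len(username) < 1 or len(username) > 39:
--         return False
--
--     if username.lower() in RESERVED_KEYWORDS:
--         return False
--
--     if not all(c.isalnum() or c == '-' for c in username):
--         return False
--
--     if username.startswith('-') or username.endswith('-'):
--         return False
--
--     if '--' in username:
--         return False
--
--     return True
-- ===== SOURCE B (Python) =====
-- RESERVED_KEYWORDS = {
--     'about', 'abuse', 'account', 'admin', 'api', 'apps', 'archive',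
--     'blog', 'business', 'collections', 'contact', 'dashboard', 'desktop',
--     'dev', 'docs', 'enterprise', 'events', 'explore', 'features',
--     'followers', 'following', 'gist', 'gists', 'help', 'home',
--     'issues', 'jobs', 'login', 'logout', 'marketplace', 'new',
--     'news', 'notifications', 'orgs', 'organizations', 'pricing',
--     'private', 'public', 'pulls', 'repositories', 'search', 'security',
--     'settings', 'shop', 'site', 'sponsors', 'status', 'support',
--     'team', 'teams', 'topics', 'tos', 'trending', 'www', 'abuse', 'security'
-- }
--
-- def is_valid_github_username(username):
--     n = len(username)
--     if n < 1 or n > 39: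
--         return False
--     if username.lower() in RESERVED_KEYWORDS:
--         return False
--     if username[0] == '-' or username[-1] == '-':
--         return False
--     prev_hyphen = False
--     for c in username:
--         if c == '-':
--             if prev_hyphen:
--                 return False
--             prev_hyphen = True
--         elif c.isalnum():
--             prev_hyphen = False
--         else:
--             return False
--     return True
-- ===== Notes on version B (the rewrite author's own statement) =====
-- stated objective: alternative
-- what changed: Replaces A's three separate character passes (all-isalnum-or-hyphen scan, '--' substring scan, startswith/endswith checks) with one single pass that tracks whether the previous character was a hyphen, plus direct first/last character comparisons.
import Mathlib
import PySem

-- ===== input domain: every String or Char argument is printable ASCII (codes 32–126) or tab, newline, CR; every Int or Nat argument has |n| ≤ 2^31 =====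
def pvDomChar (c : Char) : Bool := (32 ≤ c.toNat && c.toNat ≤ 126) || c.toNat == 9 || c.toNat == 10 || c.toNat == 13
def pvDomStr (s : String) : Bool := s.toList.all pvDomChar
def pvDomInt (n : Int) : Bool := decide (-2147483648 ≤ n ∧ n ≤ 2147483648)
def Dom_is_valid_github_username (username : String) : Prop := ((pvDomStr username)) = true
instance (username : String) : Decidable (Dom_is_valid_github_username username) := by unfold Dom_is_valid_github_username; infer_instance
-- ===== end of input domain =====

-- B fuses A's three character passes (alnum-or-hyphen scan, '--' substring scan, edge-hyphen checks) into one stateful pass; alternative decomposition, same cost.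


-- ===== PORT A =====
-- RESERVED_KEYWORDS (a Python set literal; duplicates 'abuse'/'security' dedup on construction)
def pvReserved : PySem.Set String := PySem.Set.ofList [
  "about", "abuse", "account", "admin", "api", "apps", "archive",
  "blog", "business", "collections", "contact", "dashboard", "desktop",
  "dev", "docs", "enterprise", "events", "explore", "features",
  "followers", "following", "gist", "gists", "help", "home",
  "issues", "jobs", "login", "logout", "marketplace", "new",
  "news", "notifications", "orgs", "organizations", "pricing",
  "private", "public", "pulls", "repositories", "search", "security",
  "settings", "shop", "site", "sponsors", "status", "support",
  "team", "teams", "topics", "tos", "trending", "www", "abuse", "security"]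

def is_valid_github_username (username : String) : Bool :=
  if username == "" || PySem.Str.len username < 1 || PySem.Str.len username > 39 then false
  else if PySem.Set.contains pvReserved (PySem.Str.lower username) then false
  else if !(username.toList.all (fun c => PySem.Chars.isalnum c || c == '-')) then false
  else if PySem.Str.startswith username "-" || PySem.Str.endswith username "-" then false
  else if PySem.Str.isIn "--" username then false
  else true

-- ===== PORT B =====
-- the for-loop of Source B: state = prev_hyphen
def pvAltLoop : List Char → Bool → Bool
  | [], _ => true
  | c :: rest, prev =>
    if c == '-' then
      if prev then false else pvAltLoop rest true
    else if PySem.Chars.isalnum c then pvAltLoop rest false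
    else false

def is_valid_github_username_alt (username : String) : Bool :=
  if username.toList.length < 1 || username.toList.length > 39 then false
  else if PySem.Set.contains pvReserved (PySem.Str.lower username) then false
  else if username.toList.head? == some '-' || username.toList.getLast? == some '-' then false
  else pvAltLoop username.toList false

-- ===== PRECONDITION & SPEC =====
def Spec_is_valid_github_username (username : String) (out : Bool) : Prop := out = is_valid_github_username_alt username
instance (username : String) (out : Bool) : Decidable (Spec_is_valid_github_username username out) := by unfold Spec_is_valid_github_username; infer_instance

-- ===== CLAIM (what is proved, stated in full; the proofs are below) =====
def Claim_equal_is_valid_github_username : Prop := ∀ (username : String), Dom_is_valid_github_username username → Spec_is_valid_github_username username (is_valid_github_username username)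

-- ===== LEMMAS AND PROOFS =====

-- structural one-step form of "['-','-'] is an infix"
def pvHasDD : List Char → Bool
  | [] => false
  | c :: t => (c == '-' && t.head? == some '-') || pvHasDD t

theorem pvHasDD_iff_infix (cs : List Char) : pvHasDD cs = true ↔ ['-', '-'] <:+: cs := by
  induction cs with
  | nil => simp [pvHasDD]
  | cons c t ih =>
    simp only [pvHasDD, Bool.or_eq_true, Bool.and_eq_true, beq_iff_eq, ih,
      List.infix_cons_iff]
    constructor
    · rintro (⟨hc, ht⟩ | h)
      · left
        cases t with
        | nil => simp at ht
        | cons b t' =>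
          simp only [List.head?_cons, Option.some.injEq] at ht
          subst hc ht
          exact ⟨t', rfl⟩
      · right; exact h
    · rintro (⟨r, hr⟩ | h)
      · left
        cases t with
        | nil => simp at hr
        | cons b t' =>
          simp only [List.cons_append, List.cons.injEq] at hr
          obtain ⟨h1, h2, _⟩ := hr
          exact ⟨h1.symm, by simp [← h2]⟩
      · right; exact h

theorem pvAltLoop_char (cs : List Char) (prev : Bool) :
    pvAltLoop cs prev =
      (!(prev && cs.head? == some '-')
        && cs.all (fun c => PySem.Chars.isalnum c || c == '-')
        && !pvHasDD cs) := by
  induction cs generalizing prev with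
  | nil => simp [pvAltLoop, pvHasDD]
  | cons c t ih =>
    simp only [pvAltLoop, pvHasDD, List.all_cons]
    by_cases hc : c = '-'
    · subst hc
      cases prev with
      | false => simp [ih]; cases t.head? == some '-' <;> simp
      | true => simp
    · have hcb : (c == '-') = false := by simp [hc]
      by_cases ha : PySem.Chars.isalnum c = true
      · simp [hcb, ha, ih]
      · simp [hcb, ha]

theorem head?_hyphen_iff_startswith (s : String) :
    (s.toList.head? == some '-') = PySem.Str.startswith s "-" := by
  rcases h : s.toList with _ | ⟨c, t⟩
  · simp [PySem.Str.startswith, PySem.Chars.startswith, h]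
  · simp [PySem.Str.startswith, PySem.Chars.startswith, h, List.isPrefixOf]
    exact eq_comm

theorem getLast?_hyphen_iff_endswith (s : String) :
    (s.toList.getLast? == some '-') = PySem.Str.endswith s "-" := by
  have : ∀ cs : List Char, (cs.getLast? == some '-') = PySem.Chars.endswith cs ['-'] := by
    intro cs
    rw [Bool.eq_iff_iff, beq_iff_eq, PySem.Chars.endswith_iff]
    constructor
    · intro h
      rcases cs.eq_nil_or_concat with rfl | ⟨t, b, rfl⟩
      · exact absurd h (by simp)
      · have hb : b = '-' := by simpa using h
        exact ⟨t, by rw [hb, List.concat_eq_append]⟩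
    · rintro ⟨r, rfl⟩
      simp
  simpa [PySem.Str.endswith] using this s.toList

theorem isIn_dd_eq_pvHasDD (s : String) :
    PySem.Str.isIn "--" s = pvHasDD s.toList := by
  rw [Bool.eq_iff_iff, pvHasDD_iff_infix, PySem.Str.isIn_iff_infix]
  constructor <;> intro h <;> simpa using h

-- ===== VERDICT (by name: the statement is the Claim_ definition above) =====
theorem is_valid_github_username_spec : Claim_equal_is_valid_github_username := by
  intro username _
  unfold Spec_is_valid_github_username is_valid_github_username is_valid_github_username_alt
  rw [pvAltLoop_char, ← head?_hyphen_iff_startswith, ← getLast?_hyphen_iff_endswith,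
    isIn_dd_eq_pvHasDD]
  by_cases he : username = ""
  · subst he; rfl
  · cases h1 : (username.toList.head? == some '-') <;>
      cases h2 : (username.toList.getLast? == some '-') <;>
        cases h3 : (username.toList.all fun c => PySem.Chars.isalnum c || c == '-') <;>
          cases h4 : pvHasDD username.toList <;>
            simp [h3, h4, he, PySem.Str.len_eq]
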